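-- pv_equiv track=rewrite | github.com/DPNT-Sourcecode/CHK-oquy01 | lib/solutions/CHK/checkout_solution.py | updateCounterDict
-- ===== SOURCE A (Python) =====
-- def updateCounterDict(counterDict):
--     for key,value in counterDict.items():
--         if key == 'E' and 'B' in counterDict:
--             counterDict['B'] = max(counterDict['B'] - counterDict['E'] // 2,0)
--         if key == 'F':
--             counterDict['F'] -= counterDict['F'] // 3
--         if key == 'N' and 'M' in counterDict:
--             counterDict['M'] = max(counterDict['M'] - counterDict['N'] // 3,0)
--         if key == 'R' and 'Q' in counterDict:
--             counterDict['Q'] = max(counterDict['Q'] - counterDict['R'] // 3,0)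
--         if key == 'U':
--             counterDict['U'] -= counterDict['U'] // 4
--     return counterDict
-- ===== SOURCE B (Python) =====
-- def updateCounterDict(counterDict):
--     # Five direct guarded updates instead of scanning every dict entry.
--     if 'E' in counterDict and 'B' in counterDict:
--         counterDict['B'] = max(counterDict['B'] - counterDict['E'] // 2, 0)
--     if 'F' in counterDict:
--         counterDict['F'] -= counterDict['F'] // 3
--     if 'N' in counterDict and 'M' in counterDict:
--         counterDict['M'] = max(counterDict['M'] - counterDict['N'] // 3, 0)
--     if 'R' in counterDict and 'Q' in counterDict:
--         counterDict['Q'] = max(counterDict['Q'] - counterDict['R'] // 3, 0)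
--     if 'U' in counterDict:
--         counterDict['U'] -= counterDict['U'] // 4
--     return counterDict
-- ===== Notes on version B (the rewrite author's own statement) =====
-- stated objective: simpler
-- what changed: B drops A's loop over every dict entry and applies the five discount rules as direct guarded key lookups/updates in a fixed order (proved order-independent since each rule touches a distinct target key).
import Mathlib
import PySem

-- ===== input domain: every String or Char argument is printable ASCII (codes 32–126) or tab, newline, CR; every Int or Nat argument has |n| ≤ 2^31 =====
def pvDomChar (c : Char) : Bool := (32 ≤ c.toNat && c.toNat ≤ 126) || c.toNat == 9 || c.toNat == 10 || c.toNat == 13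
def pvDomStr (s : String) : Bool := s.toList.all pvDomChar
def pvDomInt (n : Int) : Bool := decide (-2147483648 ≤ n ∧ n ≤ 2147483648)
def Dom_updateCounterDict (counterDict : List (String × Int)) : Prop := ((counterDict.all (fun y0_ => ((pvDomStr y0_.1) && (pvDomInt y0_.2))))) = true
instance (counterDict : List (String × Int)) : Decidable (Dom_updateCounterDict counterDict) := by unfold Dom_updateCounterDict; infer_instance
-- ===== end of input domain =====

-- B replaces A's scan over every dict entry by five direct guarded key updates (simpler decomposition);
-- in Python both A and B mutate the argument dict in place and return that same object — the theorem
-- below is about the returned dict.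

-- ===== PORT A =====
-- loop body of A's `for key,value in counterDict.items()` (value is unused by the body; the loop
-- never adds or removes keys, so the iterated key sequence is the original item list's keys)
def pvStepA (d : PySem.Dict String Int) (kv : String × Int) : PySem.Dict String Int :=
  let d := if kv.1 == "E" && d.contains "B" then
      d.insert "B" (max (d.getD "B" 0 - PySem.Int.floordiv (d.getD "E" 0) 2) 0) else d
  let d := if kv.1 == "F" then
      d.insert "F" (d.getD "F" 0 - PySem.Int.floordiv (d.getD "F" 0) 3) else d
  let d := if kv.1 == "N" && d.contains "M" then
      d.insert "M" (max (d.getD "M" 0 - PySem.Int.floordiv (d.getD "N" 0) 3) 0) else d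
  let d := if kv.1 == "R" && d.contains "Q" then
      d.insert "Q" (max (d.getD "Q" 0 - PySem.Int.floordiv (d.getD "R" 0) 3) 0) else d
  if kv.1 == "U" then
      d.insert "U" (d.getD "U" 0 - PySem.Int.floordiv (d.getD "U" 0) 4) else d

def updateCounterDict (counterDict : List (String × Int)) : List (String × Int) :=
  (counterDict.foldl pvStepA (PySem.Dict.mk counterDict)).items

-- ===== PORT B =====
def updateCounterDict_alt (counterDict : List (String × Int)) : List (String × Int) :=
  let d0 := PySem.Dict.mk counterDict
  let d1 := if d0.contains "E" && d0.contains "B" then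
      d0.insert "B" (max (d0.getD "B" 0 - PySem.Int.floordiv (d0.getD "E" 0) 2) 0) else d0
  let d2 := if d1.contains "F" then
      d1.insert "F" (d1.getD "F" 0 - PySem.Int.floordiv (d1.getD "F" 0) 3) else d1
  let d3 := if d2.contains "N" && d2.contains "M" then
      d2.insert "M" (max (d2.getD "M" 0 - PySem.Int.floordiv (d2.getD "N" 0) 3) 0) else d2
  let d4 := if d3.contains "R" && d3.contains "Q" then
      d3.insert "Q" (max (d3.getD "Q" 0 - PySem.Int.floordiv (d3.getD "R" 0) 3) 0) else d3
  let d5 := if d4.contains "U" then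
      d4.insert "U" (d4.getD "U" 0 - PySem.Int.floordiv (d4.getD "U" 0) 4) else d4
  d5.items

-- ===== PRECONDITION & SPEC =====
-- Pre_ excludes association lists with a repeated key: the argument is a Python dict, which cannot
-- hold duplicate keys, so duplicate-key lists encode no Python input of A.
def Pre_updateCounterDict (counterDict : List (String × Int)) : Prop :=
  (counterDict.map Prod.fst).Nodup
instance (counterDict : List (String × Int)) : Decidable (Pre_updateCounterDict counterDict) := by
  unfold Pre_updateCounterDict; infer_instance

def pvWitness_updateCounterDict : (List (String × Int)) := [("B", 3), ("E", 4), ("F", 7), ("U", 9)]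

def Spec_updateCounterDict (counterDict : List (String × Int)) (out : List (String × Int)) : Prop := out = updateCounterDict_alt counterDict
instance (counterDict : List (String × Int)) (out : List (String × Int)) : Decidable (Spec_updateCounterDict counterDict out) := by unfold Spec_updateCounterDict; infer_instance

-- ===== CLAIM (what is proved, stated in full; the proofs are below) =====
def Claim_equal_updateCounterDict : Prop := ∀ (counterDict : List (String × Int)), Dom_updateCounterDict counterDict → Pre_updateCounterDict counterDict → Spec_updateCounterDict counterDict (updateCounterDict counterDict)

-- ===== LEMMAS AND PROOFS =====

-- value of key k in the original dict L
def pvLk (L : List (String × Int)) (k : String) : Int := (PySem.Dict.mk L).getD k 0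

-- final value of a row (k, v) of L once the trigger keys in P have been processed
def pvVal (L : List (String × Int)) (P : List String) (k : String) (v : Int) : Int :=
  if k = "B" ∧ "E" ∈ P then max (v - PySem.Int.floordiv (pvLk L "E") 2) 0
  else if k = "F" ∧ "F" ∈ P then v - PySem.Int.floordiv v 3
  else if k = "M" ∧ "N" ∈ P then max (v - PySem.Int.floordiv (pvLk L "N") 3) 0
  else if k = "Q" ∧ "R" ∈ P then max (v - PySem.Int.floordiv (pvLk L "R") 3) 0
  else if k = "U" ∧ "U" ∈ P then v - PySem.Int.floordiv v 4
  else v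

-- the dict state after processing the triggers in P
def pvSD (L : List (String × Int)) (P : List String) : PySem.Dict String Int :=
  PySem.Dict.mk (L.map (fun kv => (kv.1, pvVal L P kv.1 kv.2)))

theorem pvSD_nil (L : List (String × Int)) : pvSD L [] = PySem.Dict.mk L := by
  simp [pvSD, pvVal]

theorem pv_get?_mk_map (g : String → Int → Int) (L : List (String × Int)) (k : String) :
    (PySem.Dict.mk (L.map (fun kv => (kv.1, g kv.1 kv.2)))).get? k
      = ((PySem.Dict.mk L).get? k).map (g k) := by
  induction L with
  | nil => simp [PySem.Dict.get?]
  | cons kv L ih =>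
      obtain ⟨k1, v1⟩ := kv
      rw [List.map_cons, PySem.Dict.get?_mk_cons, PySem.Dict.get?_mk_cons]
      by_cases h : (k1 == k) = true
      · have hk : k1 = k := by simpa using h
        simp [hk]
      · have h' : (k1 == k) = false := by simpa using h
        simp [h', ih]

theorem pv_get?_SD (L : List (String × Int)) (P : List String) (k : String) :
    (pvSD L P).get? k = ((PySem.Dict.mk L).get? k).map (pvVal L P k) :=
  pv_get?_mk_map _ L k

theorem pv_contains_SD (L : List (String × Int)) (P : List String) (k : String) :
    (pvSD L P).contains k = (PySem.Dict.mk L).contains k := by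
  rw [PySem.Dict.contains_eq_isSome_get?, PySem.Dict.contains_eq_isSome_get? (PySem.Dict.mk L),
    pv_get?_SD]
  exact Option.isSome_map

theorem pv_contains_mk (L : List (String × Int)) (k : String) :
    (PySem.Dict.mk L).contains k = true ↔ k ∈ L.map Prod.fst := by
  rw [PySem.Dict.contains_iff_mem_keys, PySem.Dict.keys_mk]

theorem pv_contains_SD_true (L : List (String × Int)) (P : List String) (k : String)
    (h : k ∈ L.map Prod.fst) : (pvSD L P).contains k = true := by
  rw [pv_contains_SD]; exact (pv_contains_mk L k).mpr h

theorem pv_contains_SD_false (L : List (String × Int)) (P : List String) (k : String)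
    (h : k ∉ L.map Prod.fst) : (pvSD L P).contains k = false := by
  rw [pv_contains_SD]
  cases hx : (PySem.Dict.mk L).contains k with
  | false => rfl
  | true => exact absurd ((pv_contains_mk L k).mp hx) h

theorem pv_get?_mk_of_mem (L : List (String × Int)) (kv : String × Int)
    (hnd : (L.map Prod.fst).Nodup) (hkv : kv ∈ L) :
    (PySem.Dict.mk L).get? kv.1 = some kv.2 :=
  PySem.Dict.get?_of_mem_items (d := PySem.Dict.mk L) hkv (by simpa [PySem.Dict.keys_mk] using hnd)

theorem pv_mem_keys_get? (L : List (String × Int)) (k : String)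
    (h : k ∈ L.map Prod.fst) : ∃ v, (PySem.Dict.mk L).get? k = some v := by
  cases hg : (PySem.Dict.mk L).get? k with
  | some v => exact ⟨v, rfl⟩
  | none =>
      exfalso
      have hnk : k ∉ (PySem.Dict.mk L).keys :=
        (PySem.Dict.get?_eq_none_iff_not_mem_keys _ _).mp hg
      exact hnk (by simpa [PySem.Dict.keys_mk] using h)

-- getD of a key whose rows pvVal leaves unchanged
theorem pv_getD_SD (L : List (String × Int)) (P : List String) (k : String)
    (hid : ∀ v, pvVal L P k v = v) :
    (pvSD L P).getD k 0 = pvLk L k := by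
  rw [PySem.Dict.getD_eq_get?_getD, pv_get?_SD, pvLk, PySem.Dict.getD_eq_get?_getD]
  cases (PySem.Dict.mk L).get? k <;> simp [hid]

theorem pvVal_congr (L : List (String × Int)) (P P' : List String) (k : String) (v : Int)
    (hE : ("E" ∈ P) ↔ ("E" ∈ P')) (hF : ("F" ∈ P) ↔ ("F" ∈ P'))
    (hN : ("N" ∈ P) ↔ ("N" ∈ P')) (hR : ("R" ∈ P) ↔ ("R" ∈ P'))
    (hU : ("U" ∈ P) ↔ ("U" ∈ P')) :
    pvVal L P k v = pvVal L P' k v := by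
  simp only [pvVal, hE, hF, hN, hR, hU]

theorem pvSD_congr (L : List (String × Int)) (P P' : List String)
    (hE : ("E" ∈ P) ↔ ("E" ∈ P')) (hF : ("F" ∈ P) ↔ ("F" ∈ P'))
    (hN : ("N" ∈ P) ↔ ("N" ∈ P')) (hR : ("R" ∈ P) ↔ ("R" ∈ P'))
    (hU : ("U" ∈ P) ↔ ("U" ∈ P')) :
    pvSD L P = pvSD L P' := by
  unfold pvSD
  congr 1
  apply List.map_congr_left
  intro kv _
  exact congrArg (fun z => (kv.1, z)) (pvVal_congr L P P' kv.1 kv.2 hE hF hN hR hU)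

-- if no row of L has key tgt, two processed sets agreeing off tgt give the same state
theorem pvSD_absent (L : List (String × Int)) (P P' : List String) (tgt : String)
    (habs : tgt ∉ L.map Prod.fst)
    (hRest : ∀ kv ∈ L, kv.1 ≠ tgt → pvVal L P kv.1 kv.2 = pvVal L P' kv.1 kv.2) :
    pvSD L P = pvSD L P' := by
  unfold pvSD
  congr 1
  apply List.map_congr_left
  intro kv hkv
  have hne : kv.1 ≠ tgt := fun e => habs (List.mem_map.mpr ⟨kv, hkv, e⟩)
  exact congrArg (fun z => (kv.1, z)) (hRest kv hkv hne)

-- the workhorse: one guarded insert advances the processed-trigger set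
theorem pvSD_insert_step (L : List (String × Int)) (P P' : List String)
    (t tgt : String) (f : Int → Int → Int) (v0 : Int)
    (hnd : (L.map Prod.fst).Nodup)
    (hv0 : (PySem.Dict.mk L).get? tgt = some v0)
    (hTgtOld : pvVal L P tgt v0 = v0)
    (hsrc : (pvSD L P).getD t 0 = pvLk L t)
    (hTgtNew : pvVal L P' tgt v0 = f v0 (pvLk L t))
    (hRest : ∀ kv ∈ L, kv.1 ≠ tgt → pvVal L P kv.1 kv.2 = pvVal L P' kv.1 kv.2) :
    (pvSD L P).insert tgt (f ((pvSD L P).getD tgt 0) ((pvSD L P).getD t 0)) = pvSD L P' := by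
  have hget : (pvSD L P).get? tgt = some v0 := by
    rw [pv_get?_SD, hv0]; simp [hTgtOld]
  have hgetD : (pvSD L P).getD tgt 0 = v0 := by
    rw [PySem.Dict.getD_eq_get?_getD, hget]; rfl
  have hcont : (pvSD L P).contains tgt = true := by
    rw [PySem.Dict.contains_eq_isSome_get?, hget]; rfl
  apply PySem.Dict.ext
  rw [PySem.Dict.items_insert_of_contains _ _ hcont]
  have hitems : (pvSD L P).items = L.map (fun kv => (kv.1, pvVal L P kv.1 kv.2)) := rfl
  have hitems' : (pvSD L P').items = L.map (fun kv => (kv.1, pvVal L P' kv.1 kv.2)) := rfl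
  rw [hitems, hitems', List.map_map]
  apply List.map_congr_left
  intro kv hkv
  by_cases he : kv.1 = tgt
  · have hv : kv.2 = v0 := by
      have h2 := pv_get?_mk_of_mem L kv hnd hkv
      rw [he, hv0] at h2
      exact (Option.some.inj h2).symm
    simp only [Function.comp_apply]
    rw [if_pos (by simpa using he)]
    rw [hgetD, hsrc, ← hTgtNew, he, hv]
  · have hb : (kv.1 == tgt) = false := by simpa using he
    simp only [Function.comp_apply]
    rw [if_neg (by simp [hb])]
    exact congrArg (fun z => (kv.1, z)) (hRest kv hkv he)

-- snoc-irrelevance of pvVal for rows a trigger does not touch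
theorem pvVal_snoc (L : List (String × Int)) (P : List String) (t k : String) (v : Int)
    (hB : k = "B" → t ≠ "E") (hF : k = "F" → t ≠ "F") (hM : k = "M" → t ≠ "N")
    (hQ : k = "Q" → t ≠ "R") (hU : k = "U" → t ≠ "U") :
    pvVal L (P ++ [t]) k v = pvVal L P k v := by
  by_cases hkB : k = "B"
  · have ht := Ne.symm (hB hkB)
    simp [pvVal, hkB, List.mem_append, ht]
  · by_cases hkF : k = "F"
    · have ht := Ne.symm (hF hkF)
      simp [pvVal, hkF, List.mem_append, ht]
    · by_cases hkM : k = "M"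
      · have ht := Ne.symm (hM hkM)
        simp [pvVal, hkM, List.mem_append, ht]
      · by_cases hkQ : k = "Q"
        · have ht := Ne.symm (hQ hkQ)
          simp [pvVal, hkQ, List.mem_append, ht]
        · by_cases hkU : k = "U"
          · have ht := Ne.symm (hU hkU)
            simp [pvVal, hkU, List.mem_append, ht]
          · simp [pvVal, hkB, hkF, hkM, hkQ, hkU]

theorem pvSD_snoc_other (L : List (String × Int)) (P : List String) (t : String)
    (h : t ∉ (["E", "F", "N", "R", "U"] : List String)) :
    pvSD L (P ++ [t]) = pvSD L P := by
  simp only [List.mem_cons, List.not_mem_nil, or_false, not_or] at h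
  apply pvSD_congr <;>
    simp [List.mem_append, Ne.symm h.1, Ne.symm h.2.1, Ne.symm h.2.2.1, Ne.symm h.2.2.2.1,
      Ne.symm h.2.2.2.2]

-- the five trigger steps (shared by both ports)
theorem pv_step_E (L : List (String × Int)) (P : List String)
    (hnd : (L.map Prod.fst).Nodup) (hEP : "E" ∉ P) (hB : "B" ∈ L.map Prod.fst) :
    (pvSD L P).insert "B" (max ((pvSD L P).getD "B" 0 - PySem.Int.floordiv ((pvSD L P).getD "E" 0) 2) 0)
      = pvSD L (P ++ ["E"]) := by
  rcases pv_mem_keys_get? L "B" hB with ⟨v0, hv0⟩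
  exact pvSD_insert_step L P (P ++ ["E"]) "E" "B"
    (fun a b => max (a - PySem.Int.floordiv b 2) 0) v0 hnd hv0
    (by simp [pvVal, hEP])
    (pv_getD_SD L P "E" (fun v => by simp [pvVal]))
    (by simp [pvVal, List.mem_append])
    (fun kv _ hne => (pvVal_snoc L P "E" kv.1 kv.2
      (fun h => absurd h hne) (fun _ => by decide) (fun _ => by decide)
      (fun _ => by decide) (fun _ => by decide)).symm)

theorem pv_step_F (L : List (String × Int)) (P : List String)
    (hnd : (L.map Prod.fst).Nodup) (hFP : "F" ∉ P) (hF : "F" ∈ L.map Prod.fst) :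
    (pvSD L P).insert "F" ((pvSD L P).getD "F" 0 - PySem.Int.floordiv ((pvSD L P).getD "F" 0) 3)
      = pvSD L (P ++ ["F"]) := by
  rcases pv_mem_keys_get? L "F" hF with ⟨v0, hv0⟩
  have hlk : pvLk L "F" = v0 := by
    rw [pvLk, PySem.Dict.getD_eq_get?_getD, hv0]; rfl
  exact pvSD_insert_step L P (P ++ ["F"]) "F" "F"
    (fun a b => a - PySem.Int.floordiv b 3) v0 hnd hv0
    (by simp [pvVal, hFP])
    (pv_getD_SD L P "F" (fun v => by simp [pvVal, hFP]))
    (by simp [pvVal, List.mem_append, hlk])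
    (fun kv _ hne => (pvVal_snoc L P "F" kv.1 kv.2
      (fun _ => by decide) (fun h => absurd h hne) (fun _ => by decide)
      (fun _ => by decide) (fun _ => by decide)).symm)

theorem pv_step_N (L : List (String × Int)) (P : List String)
    (hnd : (L.map Prod.fst).Nodup) (hNP : "N" ∉ P) (hM : "M" ∈ L.map Prod.fst) :
    (pvSD L P).insert "M" (max ((pvSD L P).getD "M" 0 - PySem.Int.floordiv ((pvSD L P).getD "N" 0) 3) 0)
      = pvSD L (P ++ ["N"]) := by
  rcases pv_mem_keys_get? L "M" hM with ⟨v0, hv0⟩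
  exact pvSD_insert_step L P (P ++ ["N"]) "N" "M"
    (fun a b => max (a - PySem.Int.floordiv b 3) 0) v0 hnd hv0
    (by simp [pvVal, hNP])
    (pv_getD_SD L P "N" (fun v => by simp [pvVal]))
    (by simp [pvVal, List.mem_append])
    (fun kv _ hne => (pvVal_snoc L P "N" kv.1 kv.2
      (fun _ => by decide) (fun _ => by decide) (fun h => absurd h hne)
      (fun _ => by decide) (fun _ => by decide)).symm)

theorem pv_step_R (L : List (String × Int)) (P : List String)
    (hnd : (L.map Prod.fst).Nodup) (hRP : "R" ∉ P) (hQ : "Q" ∈ L.map Prod.fst) :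
    (pvSD L P).insert "Q" (max ((pvSD L P).getD "Q" 0 - PySem.Int.floordiv ((pvSD L P).getD "R" 0) 3) 0)
      = pvSD L (P ++ ["R"]) := by
  rcases pv_mem_keys_get? L "Q" hQ with ⟨v0, hv0⟩
  exact pvSD_insert_step L P (P ++ ["R"]) "R" "Q"
    (fun a b => max (a - PySem.Int.floordiv b 3) 0) v0 hnd hv0
    (by simp [pvVal, hRP])
    (pv_getD_SD L P "R" (fun v => by simp [pvVal]))
    (by simp [pvVal, List.mem_append])
    (fun kv _ hne => (pvVal_snoc L P "R" kv.1 kv.2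
      (fun _ => by decide) (fun _ => by decide) (fun _ => by decide)
      (fun h => absurd h hne) (fun _ => by decide)).symm)

theorem pv_step_U (L : List (String × Int)) (P : List String)
    (hnd : (L.map Prod.fst).Nodup) (hUP : "U" ∉ P) (hU : "U" ∈ L.map Prod.fst) :
    (pvSD L P).insert "U" ((pvSD L P).getD "U" 0 - PySem.Int.floordiv ((pvSD L P).getD "U" 0) 4)
      = pvSD L (P ++ ["U"]) := by
  rcases pv_mem_keys_get? L "U" hU with ⟨v0, hv0⟩
  have hlk : pvLk L "U" = v0 := by
    rw [pvLk, PySem.Dict.getD_eq_get?_getD, hv0]; rfl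
  exact pvSD_insert_step L P (P ++ ["U"]) "U" "U"
    (fun a b => a - PySem.Int.floordiv b 4) v0 hnd hv0
    (by simp [pvVal, hUP])
    (pv_getD_SD L P "U" (fun v => by simp [pvVal, hUP]))
    (by simp [pvVal, List.mem_append, hlk])
    (fun kv _ hne => (pvVal_snoc L P "U" kv.1 kv.2
      (fun _ => by decide) (fun _ => by decide) (fun _ => by decide)
      (fun _ => by decide) (fun h => absurd h hne)).symm)

-- absent-target collapses
theorem pvSD_snoc_E_noB (L : List (String × Int)) (P : List String)
    (hB : "B" ∉ L.map Prod.fst) : pvSD L (P ++ ["E"]) = pvSD L P :=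
  pvSD_absent L (P ++ ["E"]) P "B" hB (fun kv _ hne =>
    pvVal_snoc L P "E" kv.1 kv.2 (fun h => absurd h hne) (fun _ => by decide)
      (fun _ => by decide) (fun _ => by decide) (fun _ => by decide))

theorem pvSD_snoc_N_noM (L : List (String × Int)) (P : List String)
    (hM : "M" ∉ L.map Prod.fst) : pvSD L (P ++ ["N"]) = pvSD L P :=
  pvSD_absent L (P ++ ["N"]) P "M" hM (fun kv _ hne =>
    pvVal_snoc L P "N" kv.1 kv.2 (fun _ => by decide) (fun _ => by decide)
      (fun h => absurd h hne) (fun _ => by decide) (fun _ => by decide))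

theorem pvSD_snoc_R_noQ (L : List (String × Int)) (P : List String)
    (hQ : "Q" ∉ L.map Prod.fst) : pvSD L (P ++ ["R"]) = pvSD L P :=
  pvSD_absent L (P ++ ["R"]) P "Q" hQ (fun kv _ hne =>
    pvVal_snoc L P "R" kv.1 kv.2 (fun _ => by decide) (fun _ => by decide)
      (fun _ => by decide) (fun h => absurd h hne) (fun _ => by decide))

-- A's loop body advances the processed set by the visited key
theorem pv_stepA_SD (L : List (String × Int)) (P : List String) (kv : String × Int)
    (hnd : (L.map Prod.fst).Nodup) (hkv : kv ∈ L) (hP : kv.1 ∉ P) :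
    pvStepA (pvSD L P) kv = pvSD L (P ++ [kv.1]) := by
  obtain ⟨k1, v1⟩ := kv
  have hkey : k1 ∈ L.map Prod.fst := List.mem_map.mpr ⟨(k1, v1), hkv, rfl⟩
  simp only [] at hP ⊢
  by_cases hE : k1 = "E"
  · subst hE
    by_cases hB : "B" ∈ L.map Prod.fst
    · simpa [pvStepA, pv_contains_SD_true L P _ hB] using pv_step_E L P hnd hP hB
    · simpa [pvStepA, pv_contains_SD_false L P _ hB] using (pvSD_snoc_E_noB L P hB).symm
  · by_cases hF : k1 = "F"
    · subst hF
      simpa [pvStepA] using pv_step_F L P hnd hP hkey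
    · by_cases hN : k1 = "N"
      · subst hN
        by_cases hM : "M" ∈ L.map Prod.fst
        · simpa [pvStepA, pv_contains_SD_true L P _ hM] using pv_step_N L P hnd hP hM
        · simpa [pvStepA, pv_contains_SD_false L P _ hM] using (pvSD_snoc_N_noM L P hM).symm
      · by_cases hR : k1 = "R"
        · subst hR
          by_cases hQ : "Q" ∈ L.map Prod.fst
          · simpa [pvStepA, pv_contains_SD_true L P _ hQ] using pv_step_R L P hnd hP hQ
          · simpa [pvStepA, pv_contains_SD_false L P _ hQ] using (pvSD_snoc_R_noQ L P hQ).symm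
        · by_cases hU : k1 = "U"
          · subst hU
            simpa [pvStepA] using pv_step_U L P hnd hP hkey
          · have hb : ∀ s : String, k1 ≠ s → (k1 == s) = false := fun s h => by simpa using h
            simp only [pvStepA, hb _ hE, hb _ hF, hb _ hN, hb _ hR, hb _ hU,
              Bool.false_and, Bool.false_eq_true, if_false]
            exact (pvSD_snoc_other L P k1 (by simp [hE, hF, hN, hR, hU])).symm

-- A's whole loop
theorem pv_foldA (L : List (String × Int)) (hnd : (L.map Prod.fst).Nodup) :
    ∀ (rest pre : List (String × Int)), L = pre ++ rest →
      List.foldl pvStepA (pvSD L (pre.map Prod.fst)) rest = pvSD L (L.map Prod.fst) := by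
  intro rest
  induction rest with
  | nil => intro pre h; subst h; simp
  | cons kv rest ih =>
      intro pre h
      have hkv : kv ∈ L := by rw [h]; simp
      have hP : kv.1 ∉ pre.map Prod.fst := by
        have hnd' := hnd
        rw [h] at hnd'
        simp only [List.map_append, List.map_cons, List.nodup_append] at hnd'
        intro hmem
        exact hnd'.2.2 kv.1 hmem kv.1 (by simp) rfl
      rw [List.foldl_cons, pv_stepA_SD L _ kv hnd hkv hP,
        show (pre.map Prod.fst ++ [kv.1] : List String) = (pre ++ [kv]).map Prod.fst by simp]
      exact ih (pre ++ [kv]) (by rw [h, List.append_assoc]; rfl)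

-- B's chain: the triggers actually present, accumulated in B's fixed order
def pvQ (L : List (String × Int)) (ts : List String) : List String :=
  ts.filter (fun t => decide (t ∈ L.map Prod.fst))

theorem pv_mem_pvQ (L : List (String × Int)) (ts : List String) (t : String) :
    t ∈ pvQ L ts ↔ t ∈ ts ∧ t ∈ L.map Prod.fst := by
  simp [pvQ]

theorem pv_stepB_E (L : List (String × Int)) (P : List String)
    (hnd : (L.map Prod.fst).Nodup) (hEP : "E" ∉ P) :
    (if (pvSD L P).contains "E" && (pvSD L P).contains "B" then
        (pvSD L P).insert "B" (max ((pvSD L P).getD "B" 0 - PySem.Int.floordiv ((pvSD L P).getD "E" 0) 2) 0)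
      else pvSD L P) = pvSD L (P ++ pvQ L ["E"]) := by
  by_cases hE : "E" ∈ L.map Prod.fst
  · by_cases hB : "B" ∈ L.map Prod.fst
    · simp only [pv_contains_SD_true L P _ hE, pv_contains_SD_true L P _ hB, Bool.and_self,
        if_pos]
      simpa [pvQ, hE] using pv_step_E L P hnd hEP hB
    · simp only [pv_contains_SD_false L P _ hB, Bool.and_false, Bool.false_eq_true, if_false]
      simpa [pvQ, hE] using (pvSD_snoc_E_noB L P hB).symm
  · simp [pv_contains_SD_false L P _ hE, pvQ, hE]

theorem pv_stepB_F (L : List (String × Int)) (P : List String)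
    (hnd : (L.map Prod.fst).Nodup) (hFP : "F" ∉ P) :
    (if (pvSD L P).contains "F" then
        (pvSD L P).insert "F" ((pvSD L P).getD "F" 0 - PySem.Int.floordiv ((pvSD L P).getD "F" 0) 3)
      else pvSD L P) = pvSD L (P ++ pvQ L ["F"]) := by
  by_cases hF : "F" ∈ L.map Prod.fst
  · simp only [pv_contains_SD_true L P _ hF, if_pos]
    simpa [pvQ, hF] using pv_step_F L P hnd hFP hF
  · simp [pv_contains_SD_false L P _ hF, pvQ, hF]

theorem pv_stepB_N (L : List (String × Int)) (P : List String)
    (hnd : (L.map Prod.fst).Nodup) (hNP : "N" ∉ P) :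
    (if (pvSD L P).contains "N" && (pvSD L P).contains "M" then
        (pvSD L P).insert "M" (max ((pvSD L P).getD "M" 0 - PySem.Int.floordiv ((pvSD L P).getD "N" 0) 3) 0)
      else pvSD L P) = pvSD L (P ++ pvQ L ["N"]) := by
  by_cases hN : "N" ∈ L.map Prod.fst
  · by_cases hM : "M" ∈ L.map Prod.fst
    · simp only [pv_contains_SD_true L P _ hN, pv_contains_SD_true L P _ hM, Bool.and_self,
        if_pos]
      simpa [pvQ, hN] using pv_step_N L P hnd hNP hM
    · simp only [pv_contains_SD_false L P _ hM, Bool.and_false, Bool.false_eq_true, if_false]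
      simpa [pvQ, hN] using (pvSD_snoc_N_noM L P hM).symm
  · simp [pv_contains_SD_false L P _ hN, pvQ, hN]

theorem pv_stepB_R (L : List (String × Int)) (P : List String)
    (hnd : (L.map Prod.fst).Nodup) (hRP : "R" ∉ P) :
    (if (pvSD L P).contains "R" && (pvSD L P).contains "Q" then
        (pvSD L P).insert "Q" (max ((pvSD L P).getD "Q" 0 - PySem.Int.floordiv ((pvSD L P).getD "R" 0) 3) 0)
      else pvSD L P) = pvSD L (P ++ pvQ L ["R"]) := by
  by_cases hR : "R" ∈ L.map Prod.fst
  · by_cases hQ : "Q" ∈ L.map Prod.fst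
    · simp only [pv_contains_SD_true L P _ hR, pv_contains_SD_true L P _ hQ, Bool.and_self,
        if_pos]
      simpa [pvQ, hR] using pv_step_R L P hnd hRP hQ
    · simp only [pv_contains_SD_false L P _ hQ, Bool.and_false, Bool.false_eq_true, if_false]
      simpa [pvQ, hR] using (pvSD_snoc_R_noQ L P hQ).symm
  · simp [pv_contains_SD_false L P _ hR, pvQ, hR]

theorem pv_stepB_U (L : List (String × Int)) (P : List String)
    (hnd : (L.map Prod.fst).Nodup) (hUP : "U" ∉ P) :
    (if (pvSD L P).contains "U" then
        (pvSD L P).insert "U" ((pvSD L P).getD "U" 0 - PySem.Int.floordiv ((pvSD L P).getD "U" 0) 4)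
      else pvSD L P) = pvSD L (P ++ pvQ L ["U"]) := by
  by_cases hU : "U" ∈ L.map Prod.fst
  · simp only [pv_contains_SD_true L P _ hU, if_pos]
    simpa [pvQ, hU] using pv_step_U L P hnd hUP hU
  · simp [pv_contains_SD_false L P _ hU, pvQ, hU]

-- ===== VERDICT (by name: the statement is the Claim_ definition above) =====
theorem updateCounterDict_spec : Claim_equal_updateCounterDict := by
  intro L _hDom hPre
  have hnd : (L.map Prod.fst).Nodup := hPre
  unfold Spec_updateCounterDict
  simp only [updateCounterDict, updateCounterDict_alt]
  rw [← pvSD_nil L]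
  have hA : List.foldl pvStepA (pvSD L []) L = pvSD L (L.map Prod.fst) := by
    simpa using pv_foldA L hnd L [] rfl
  rw [hA]
  rw [pv_stepB_E L [] hnd (by simp)]
  rw [pv_stepB_F L ([] ++ pvQ L ["E"]) hnd (by simp [pv_mem_pvQ])]
  rw [pv_stepB_N L _ hnd (by simp [List.mem_append, pv_mem_pvQ])]
  rw [pv_stepB_R L _ hnd (by simp [List.mem_append, pv_mem_pvQ])]
  rw [pv_stepB_U L _ hnd (by simp [List.mem_append, pv_mem_pvQ])]
  congr 1
  apply pvSD_congr <;> simp [List.mem_append, pv_mem_pvQ]
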